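-- pv_equiv track=rewrite | github.com/chuoer47/AlgorithmLearning | ACwing算法提高课/第一章-动态规划/最长上升子序列模型/1010. 拦截导弹.py | LIS_max2
-- ===== SOURCE A (Python) =====
-- def LIS_max2(weight: list):
--     n = len(weight)
--     stack = [weight[0]]
--     for i in range(1, n):
--         flag = True
--         """找到大于weight[i]的最小的序列值，进行替换"""
--         for j, v in enumerate(stack):
--             if weight[i] <= v:
--                 stack[j] = weight[i]
--                 flag = False
--                 break
--         if flag:
--             stack.append(weight[i])
--     return len(stack)
-- ===== SOURCE B (Python) =====
-- def LIS_max2(weight: list):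
--     # Binary search (bisect_left by hand) replaces A's inner linear scan: O(n log n).
--     stack = [weight[0]]
--     for x in weight[1:]:
--         lo, hi = 0, len(stack)
--         while lo < hi:
--             mid = (lo + hi) // 2
--             if stack[mid] < x:
--                 lo = mid + 1
--             else:
--                 hi = mid
--         if lo == len(stack):
--             stack.append(x)
--         else:
--             stack[lo] = x
--     return len(stack)
-- ===== Notes on version B (the rewrite author's own statement) =====
-- stated objective: faster
-- what changed: The inner linear scan for the first stack element >= x is replaced by a hand-written bisect_left binary search (the stack stays sorted), turning O(n^2) into O(n log n); Pre_ excludes only the empty list, on which both A and B raise IndexError.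
import Mathlib
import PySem

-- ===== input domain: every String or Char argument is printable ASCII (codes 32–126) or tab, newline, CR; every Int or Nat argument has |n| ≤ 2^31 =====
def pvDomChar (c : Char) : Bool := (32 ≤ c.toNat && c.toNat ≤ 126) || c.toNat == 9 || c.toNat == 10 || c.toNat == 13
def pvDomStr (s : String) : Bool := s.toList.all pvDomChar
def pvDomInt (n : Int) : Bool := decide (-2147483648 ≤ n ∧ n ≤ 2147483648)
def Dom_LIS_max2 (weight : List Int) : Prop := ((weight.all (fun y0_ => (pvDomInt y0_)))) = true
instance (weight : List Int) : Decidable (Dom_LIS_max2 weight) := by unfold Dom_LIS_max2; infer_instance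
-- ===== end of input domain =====

-- B replaces A's inner linear scan by a binary search on the (sorted) stack: O(n log n) vs O(n^2).
-- Both raise IndexError on the empty list (weight[0]); Pre_ excludes exactly that input.

-- ===== PORT A =====
-- A's inner `for j, v in enumerate(stack)` loop with break: returns the stack with the first
-- element ≥ weight[i] replaced, or none if no replacement happened (flag stayed True).
def pvAInner : List Int → Int → Option (List Int)
  | [], _ => none
  | v :: rest, x => if x ≤ v then some (x :: rest) else (pvAInner rest x).map (v :: ·)

-- one iteration of A's outer loop
def pvAStep (stack : List Int) (x : Int) : List Int :=
  match pvAInner stack x with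
  | some s => s
  | none => stack ++ [x]

def LIS_max2 (weight : List Int) : Int :=
  match weight with
  | [] => 0  -- Python raises IndexError on weight[0]; excluded by Pre_LIS_max2
  | w0 :: rest => ((rest.foldl pvAStep [w0]).length : Int)

-- ===== PORT B =====
-- hand-written bisect_left from Source B; the while loop is ported with a fuel bound
-- (hi - lo shrinks every iteration, so fuel = initial hi suffices); stack[mid] is
-- always in range, so getD 0 is exact there
def pvBisect : List Int → Int → Nat → Nat → Nat → Nat
  | _, _, lo, _, 0 => lo
  | stack, x, lo, hi, fuel + 1 =>
    if lo < hi then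
      let mid := (lo + hi) / 2
      if stack.getD mid 0 < x then pvBisect stack x (mid + 1) hi fuel
      else pvBisect stack x lo mid fuel
    else lo

-- one iteration of B's loop
def pvBStep (stack : List Int) (x : Int) : List Int :=
  let lo := pvBisect stack x 0 stack.length stack.length
  if lo = stack.length then stack ++ [x] else stack.set lo x

def LIS_max2_alt (weight : List Int) : Int :=
  match weight with
  | [] => 0  -- Python raises IndexError on weight[0]; excluded by Pre_LIS_max2
  | w0 :: rest => ((rest.foldl pvBStep [w0]).length : Int)

-- ===== PRECONDITION & SPEC =====
-- Pre_ excludes only the empty list, on which the Python A raises IndexError (weight[0]).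
def Pre_LIS_max2 (weight : List Int) : Prop := weight ≠ []
instance (weight : List Int) : Decidable (Pre_LIS_max2 weight) := by unfold Pre_LIS_max2; infer_instance
def pvWitness_LIS_max2 : List Int := [3, 1, 2]

def Spec_LIS_max2 (weight : List Int) (out : Int) : Prop := out = LIS_max2_alt weight
instance (weight : List Int) (out : Int) : Decidable (Spec_LIS_max2 weight out) := by unfold Spec_LIS_max2; infer_instance

-- ===== CLAIM (what is proved, stated in full; the proofs are below) =====
def Claim_equal_LIS_max2 : Prop := ∀ (weight : List Int), Dom_LIS_max2 weight → Pre_LIS_max2 weight → Spec_LIS_max2 weight (LIS_max2 weight)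

-- ===== LEMMAS AND PROOFS =====

-- A's step, characterised by findIdx
theorem pvAStep_eq_findIdx (stack : List Int) (x : Int) :
    pvAStep stack x =
      (if stack.findIdx (fun v => x ≤ v) < stack.length
       then stack.set (stack.findIdx (fun v => x ≤ v)) x
       else stack ++ [x]) := by
  induction stack with
  | nil => simp [pvAStep, pvAInner]
  | cons v r ih =>
    by_cases hx : x ≤ v
    · simp [pvAStep, pvAInner, hx, List.findIdx_cons]
    · have hstep : pvAStep (v :: r) x = v :: pvAStep r x := by
        simp only [pvAStep, pvAInner, if_neg hx]
        cases pvAInner r x <;> simp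
      rw [hstep, ih]
      simp only [List.findIdx_cons, decide_eq_false hx, cond_false]
      by_cases hj : r.findIdx (fun v => x ≤ v) < r.length
      · rw [if_pos hj, if_pos (by simpa using Nat.succ_lt_succ hj)]
        simp [List.set]
      · rw [if_neg hj, if_neg (by simpa using fun h => hj (Nat.lt_of_succ_lt_succ h))]
        simp

-- membership in A's step
theorem pvMem_aStep {b : Int} {stack : List Int} {x : Int} (h : b ∈ pvAStep stack x) :
    b = x ∨ b ∈ stack := by
  rw [pvAStep_eq_findIdx] at h
  split at h
  · rcases List.mem_or_eq_of_mem_set h with h' | h'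
    · exact Or.inr h'
    · exact Or.inl h'
  · rcases List.mem_append.1 h with h' | h'
    · exact Or.inr h'
    · exact Or.inl (by simpa using h')

-- A's step preserves sortedness
theorem pvAStep_sorted {stack : List Int} (hs : stack.Pairwise (· ≤ ·)) (x : Int) :
    (pvAStep stack x).Pairwise (· ≤ ·) := by
  induction stack with
  | nil => simp [pvAStep, pvAInner]
  | cons v r ih =>
    rcases List.pairwise_cons.1 hs with ⟨hv, hr⟩
    by_cases hx : x ≤ v
    · have : pvAStep (v :: r) x = x :: r := by simp [pvAStep, pvAInner, hx]
      rw [this]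
      exact List.pairwise_cons.2 ⟨fun b hb => le_trans hx (hv b hb), hr⟩
    · have hstep : pvAStep (v :: r) x = v :: pvAStep r x := by
        simp only [pvAStep, pvAInner, if_neg hx]
        cases pvAInner r x <;> simp
      rw [hstep]
      refine List.pairwise_cons.2 ⟨fun b hb => ?_, ih hr⟩
      rcases pvMem_aStep hb with rfl | hb'
      · exact le_of_not_ge hx
      · exact hv b hb'

-- sorted random access is monotone
theorem pvSorted_getD_mono {stack : List Int} (hs : stack.Pairwise (· ≤ ·))
    {i j : Nat} (hij : i ≤ j) (hj : j < stack.length) :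
    stack.getD i 0 ≤ stack.getD j 0 := by
  rcases Nat.lt_or_ge i j with h | h
  · rw [List.getD_eq_getElem _ _ (lt_trans h hj), List.getD_eq_getElem _ _ hj]
    exact List.pairwise_iff_getElem.1 hs i j _ _ h
  · have : i = j := le_antisymm hij h
    subst this; rfl

-- where the search has converged, lo is the first index with x ≤ stack[lo]
theorem pvBisect_term (stack : List Int) (x : Int) (lo : Nat) (hl : lo ≤ stack.length)
    (h1 : ∀ i, i < lo → stack.getD i 0 < x)
    (h2 : ∀ i, lo ≤ i → i < stack.length → x ≤ stack.getD i 0) :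
    lo = stack.findIdx (fun v => x ≤ v) := by
  rcases Nat.lt_or_ge lo stack.length with h | h
  · symm
    rw [List.findIdx_eq h]
    constructor
    · have := h2 lo le_rfl h
      rw [List.getD_eq_getElem _ _ h] at this
      simpa using this
    · intro j hj
      have := h1 j hj
      rw [List.getD_eq_getElem _ _ (lt_trans hj h)] at this
      simpa using not_le_of_gt this
  · have hlo' : lo = stack.length := le_antisymm hl h
    subst hlo'
    symm
    rw [List.findIdx_eq_length]
    intro v hv
    rcases List.mem_iff_getElem.1 hv with ⟨i, hilen, rfl⟩
    have := h1 i hilen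
    rw [List.getD_eq_getElem _ _ hilen] at this
    simpa using not_le_of_gt this

-- binary search on a sorted stack computes findIdx (x ≤ ·)
theorem pvBisect_eq_findIdx (stack : List Int) (x : Int) (hs : stack.Pairwise (· ≤ ·)) :
    ∀ fuel lo hi, hi - lo ≤ fuel → lo ≤ hi → hi ≤ stack.length →
      (∀ i, i < lo → stack.getD i 0 < x) →
      (∀ i, hi ≤ i → i < stack.length → x ≤ stack.getD i 0) →
      pvBisect stack x lo hi fuel = stack.findIdx (fun v => x ≤ v) := by
  intro fuel
  induction fuel with
  | zero =>
    intro lo hi hf hlh hhl h1 h2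
    have : lo = hi := by omega
    subst this
    exact pvBisect_term stack x lo hhl h1 (fun i hi' => h2 i hi')
  | succ fuel ih =>
    intro lo hi hf hlh hhl h1 h2
    rw [pvBisect]
    by_cases hlt : lo < hi
    · rw [if_pos hlt]
      have hmid1 : lo ≤ (lo + hi) / 2 := by omega
      have hmid2 : (lo + hi) / 2 < hi := by omega
      have hmidlen : (lo + hi) / 2 < stack.length := lt_of_lt_of_le hmid2 hhl
      by_cases hc : stack.getD ((lo + hi) / 2) 0 < x
      · rw [if_pos hc]
        refine ih _ _ (by omega) (by omega) hhl ?_ h2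
        intro i hi'
        rcases Nat.lt_or_ge i lo with h | h
        · exact h1 i h
        · exact lt_of_le_of_lt (pvSorted_getD_mono hs (by omega) hmidlen) hc
      · rw [if_neg hc]
        refine ih _ _ (by omega) (by omega) (le_of_lt hmidlen) h1 ?_
        intro i hi' hil
        exact le_trans (le_of_not_gt hc) (pvSorted_getD_mono hs hi' hil)
    · rw [if_neg hlt]
      have : lo = hi := le_antisymm hlh (le_of_not_gt hlt)
      subst this
      exact pvBisect_term stack x lo hhl h1 (fun i hi' => h2 i hi')

-- B's step equals A's step on a sorted stack
theorem pvStep_eq {stack : List Int} (hs : stack.Pairwise (· ≤ ·)) (x : Int) :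
    pvAStep stack x = pvBStep stack x := by
  have hb : pvBisect stack x 0 stack.length stack.length = stack.findIdx (fun v => x ≤ v) :=
    pvBisect_eq_findIdx stack x hs stack.length 0 stack.length le_rfl (Nat.zero_le _) le_rfl
      (fun i hi => absurd hi (Nat.not_lt_zero i)) (fun i hi hlt => absurd hlt (Nat.not_lt.2 hi))
  rw [pvAStep_eq_findIdx, pvBStep, hb]
  have hle : stack.findIdx (fun v => x ≤ v) ≤ stack.length := List.findIdx_le_length
  by_cases h : stack.findIdx (fun v => x ≤ v) < stack.length
  · rw [if_pos h, if_neg (Nat.ne_of_lt h)]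
  · rw [if_neg h, if_pos (le_antisymm hle (Nat.not_lt.1 h))]

-- the folds agree on any sorted initial stack
theorem pvFoldl_eq (l : List Int) :
    ∀ stack : List Int, stack.Pairwise (· ≤ ·) →
      l.foldl pvAStep stack = l.foldl pvBStep stack := by
  induction l with
  | nil => intro _ _; rfl
  | cons x r ih =>
    intro stack hs
    simp only [List.foldl_cons]
    rw [← pvStep_eq hs x, ih _ (pvAStep_sorted hs x)]

-- ===== VERDICT (by name: the statement is the Claim_ definition above) =====
theorem LIS_max2_spec : Claim_equal_LIS_max2 := by
  intro weight _ hpre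
  unfold Spec_LIS_max2
  match weight with
  | [] => exact absurd rfl hpre
  | w0 :: rest =>
    simp only [LIS_max2, LIS_max2_alt]
    rw [pvFoldl_eq rest [w0] (by simp)]
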